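-- pv_equiv track=rewrite | github.com/CheesyGamer77/DungeonWhisperer | cogs/components/__init__.py | __remove_all_dict_keys_except
-- ===== SOURCE A (Python) =====
-- from typing import Any, Callable, Dict, Generator, List, Optional, Union
--
-- def __remove_all_dict_keys_except(d: dict, key: Any) -> dict:
--     # no, you cannot just iterate over each dict key and delete it on the fly
--     # python gets very angry at you and raises a RuntimeError if you try to do that
--
--     data = d
--     to_remove = []
--     for k in data.keys():
--         if k != key:
--             to_remove.append(k)
--
--     # now we can actually delete the keys
--     for k in to_remove:
--         del data[k]
--
--     return data
-- ===== SOURCE B (Python) =====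
-- def __remove_all_dict_keys_except(d: dict, key) -> dict:
--     # Rebuild in place: save the kept value (if any), clear, reinsert.
--     if key in d:
--         val = d[key]
--         d.clear()
--         d[key] = val
--     else:
--         d.clear()
--     return d
-- ===== Notes on version B (the rewrite author's own statement) =====
-- stated objective: simpler
-- what changed: Instead of collecting every other key into a to_remove list and deleting them one by one, B saves the single kept value (if present), clears the dict, and reinserts it - no loops and no auxiliary list.
import Mathlib
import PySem

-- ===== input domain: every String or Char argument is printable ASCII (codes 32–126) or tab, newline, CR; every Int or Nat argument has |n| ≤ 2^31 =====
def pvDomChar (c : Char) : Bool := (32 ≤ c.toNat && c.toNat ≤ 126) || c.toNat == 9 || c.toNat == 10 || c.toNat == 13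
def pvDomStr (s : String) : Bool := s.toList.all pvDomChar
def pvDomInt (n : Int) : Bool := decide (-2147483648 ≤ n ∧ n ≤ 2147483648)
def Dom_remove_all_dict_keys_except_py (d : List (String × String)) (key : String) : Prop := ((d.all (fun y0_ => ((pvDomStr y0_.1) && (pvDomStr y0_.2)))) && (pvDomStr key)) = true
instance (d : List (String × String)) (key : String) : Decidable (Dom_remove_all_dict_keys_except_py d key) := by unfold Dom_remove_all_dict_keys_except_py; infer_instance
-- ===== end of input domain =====

-- B rebuilds the dict in place (save kept value, clear, reinsert) instead of collecting
-- and deleting every other key: simpler, no loops. Both A and B mutate d in place in Python;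
-- the equivalence proved here is about the returned dict's contents.


-- ===== PORT A =====
def remove_all_dict_keys_except_py (d : List (String × String)) (key : String) : List (String × String) :=
  let data := PySem.Dict.mk d
  -- to_remove = [k for k in data.keys() if k != key]
  let to_remove : List String :=
    data.keys.foldl (fun acc k => if k ≠ key then acc ++ [k] else acc) []
  -- for k in to_remove: del data[k]
  let data := to_remove.foldl (fun dd k => dd.erase k) data
  data.items

-- ===== PORT B =====
def remove_all_dict_keys_except_py_alt (d : List (String × String)) (key : String) : List (String × String) :=
  let dd := PySem.Dict.mk d
  match dd.get? key with
  | some val => ((PySem.Dict.empty : PySem.Dict String String).insert key val).items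
  | none => (PySem.Dict.empty : PySem.Dict String String).items

-- ===== PRECONDITION & SPEC =====
-- Pre_ requires the association list to have pairwise-distinct keys: it represents a Python
-- dict, which cannot hold duplicate keys, so no input reaching the Python code is excluded.
def Pre_remove_all_dict_keys_except_py (d : List (String × String)) (key : String) : Prop :=
  (d.map Prod.fst).Nodup
instance (d : List (String × String)) (key : String) : Decidable (Pre_remove_all_dict_keys_except_py d key) := by unfold Pre_remove_all_dict_keys_except_py; infer_instance
def pvWitness_remove_all_dict_keys_except_py : (List (String × String)) × String :=
  ([("a", "1"), ("b", "2")], "b")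
def Spec_remove_all_dict_keys_except_py (d : List (String × String)) (key : String) (out : List (String × String)) : Prop := out = remove_all_dict_keys_except_py_alt d key
instance (d : List (String × String)) (key : String) (out : List (String × String)) : Decidable (Spec_remove_all_dict_keys_except_py d key out) := by unfold Spec_remove_all_dict_keys_except_py; infer_instance

-- ===== CLAIM (what is proved, stated in full; the proofs are below) =====
def Claim_equal_remove_all_dict_keys_except_py : Prop := ∀ (d : List (String × String)) (key : String), Dom_remove_all_dict_keys_except_py d key → Pre_remove_all_dict_keys_except_py d key → Spec_remove_all_dict_keys_except_py d key (remove_all_dict_keys_except_py d key)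

-- ===== LEMMAS AND PROOFS =====

-- the first loop: to_remove is the list of keys different from `key`
theorem to_remove_eq (ks : List String) (key : String) :
    ks.foldl (fun acc k => if k ≠ key then acc ++ [k] else acc) [] =
      ks.filter (fun k => k ≠ key) := by
  have h : ∀ (ks : List String) (acc : List String),
      ks.foldl (fun acc k => if k ≠ key then acc ++ [k] else acc) acc =
        acc ++ ks.filter (fun k => k ≠ key) := by
    intro ks
    induction ks with
    | nil => simp
    | cons k ks ih =>
      intro acc
      rw [List.foldl_cons, ih, List.filter_cons]
      by_cases hk : k = key <;> simp [hk]
  simpa using h ks []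

-- the second loop: folding erase over a key list filters the items once
theorem foldl_erase_items (ks : List String) (dd : PySem.Dict String String) :
    (ks.foldl (fun dd k => dd.erase k) dd).items =
      dd.items.filter (fun p => ¬ ks.contains p.1) := by
  induction ks generalizing dd with
  | nil => simp
  | cons k ks ih =>
    rw [List.foldl_cons, ih]
    simp only [PySem.Dict.erase, List.filter_filter]
    apply List.filter_congr
    intro p _
    by_cases h : p.1 = k <;> simp [h]

-- A keeps exactly the pairs at `key`
theorem portA_eq_filter (d : List (String × String)) (key : String) :
    remove_all_dict_keys_except_py d key = d.filter (fun p => p.1 = key) := by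
  unfold remove_all_dict_keys_except_py
  simp only [to_remove_eq, foldl_erase_items]
  show d.filter _ = d.filter _
  apply List.filter_congr
  intro p hp
  have hmem : p.1 ∈ d.map Prod.fst := List.mem_map_of_mem hp
  by_cases h : p.1 = key
  · simp [h, List.mem_filter]
  · simp [h, List.mem_filter, hmem]

-- with distinct keys, the filter is [] or the single first hit
theorem filter_key_of_nodup (d : List (String × String)) (key : String)
    (hnd : (d.map Prod.fst).Nodup) :
    d.filter (fun p => p.1 = key) =
      match (PySem.Dict.mk d).get? key with
      | some val => [(key, val)]
      | none => [] := by
  induction d with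
  | nil => rfl
  | cons p d ih =>
    obtain ⟨pk, pv⟩ := p
    have hnd' : (d.map Prod.fst).Nodup := (List.nodup_cons.mp (by simpa using hnd)).2
    have hnotin : pk ∉ d.map Prod.fst := (List.nodup_cons.mp (by simpa using hnd)).1
    by_cases h : pk = key
    · have hnone : d.filter (fun q => q.1 = key) = [] := by
        rw [List.filter_eq_nil_iff]
        intro q hq hkq
        simp only [decide_eq_true_eq] at hkq
        exact hnotin (by rw [h, ← hkq]; exact List.mem_map_of_mem hq)
      rw [List.filter_cons]
      simp only [PySem.Dict.get?_mk_cons]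
      simp [h, hnone]
    · rw [List.filter_cons]
      simp only [PySem.Dict.get?_mk_cons]
      simp only [show (pk == key) = false by simp [h]]
      simpa [h] using ih hnd'

-- ===== VERDICT (by name: the statement is the Claim_ definition above) =====
theorem remove_all_dict_keys_except_py_spec : Claim_equal_remove_all_dict_keys_except_py := by
  intro d key _ hpre
  unfold Spec_remove_all_dict_keys_except_py
  rw [portA_eq_filter, filter_key_of_nodup d key hpre]
  unfold remove_all_dict_keys_except_py_alt
  cases h : (PySem.Dict.mk d).get? key <;> simp [h] <;> rfl
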